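-- pv_equiv track=rewrite | github.com/KevinH127/ICS-Culminating | main.py | make_hidden_word
-- ===== SOURCE A (Python) =====
-- def make_hidden_word(word):
--   hidden = []
--   for i in word:
--     # Making sure that spaces are not included in the guessed letters
--     if i != ' ':
--       hidden.append('*')
--     else:
--       hidden.append(' ')
--   return hidden
-- ===== SOURCE B (Python) =====
-- def make_hidden_word(word):
--     # Run/segment pass: split on single spaces, mask each run, rejoin, explode.
--     return list(' '.join('*' * len(run) for run in word.split(' ')))
-- ===== Notes on version B (the rewrite author's own statement) =====
-- stated objective: faster
-- what changed: Replaces the per-character append loop with a run/segment pass: split the string on the space separator, mask each run with a repeated asterisk, rejoin with spaces, and explode the result into a list; bulk string operations run in C instead of a Python-level loop.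
import Mathlib
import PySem

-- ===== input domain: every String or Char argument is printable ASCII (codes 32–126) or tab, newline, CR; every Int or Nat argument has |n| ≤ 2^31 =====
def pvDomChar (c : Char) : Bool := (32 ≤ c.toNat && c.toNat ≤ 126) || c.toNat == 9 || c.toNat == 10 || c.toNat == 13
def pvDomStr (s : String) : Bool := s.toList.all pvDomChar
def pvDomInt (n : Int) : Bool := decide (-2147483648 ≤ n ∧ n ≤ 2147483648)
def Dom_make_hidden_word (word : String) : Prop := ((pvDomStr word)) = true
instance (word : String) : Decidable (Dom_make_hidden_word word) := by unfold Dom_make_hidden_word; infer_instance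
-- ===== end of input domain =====

-- B rebuilds the masked string by runs (split on ' ', mask, rejoin) instead of A's per-character loop; same value everywhere.

-- ===== PORT A =====
def make_hidden_word (word : String) : List String :=
  word.toList.foldl
    (fun hidden i => if i ≠ ' ' then hidden ++ ["*"] else hidden ++ [" "]) []

-- ===== PORT B =====
def make_hidden_word_alt (word : String) : List String :=
  (PySem.Chars.join [' ']
      ((PySem.Chars.splitOn word.toList [' ']).map
        (fun run => List.replicate run.length '*'))).map
    (fun c => String.mk [c])

-- ===== PRECONDITION & SPEC =====
def Spec_make_hidden_word (word : String) (out : List String) : Prop := out = make_hidden_word_alt word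
instance (word : String) (out : List String) : Decidable (Spec_make_hidden_word word out) := by unfold Spec_make_hidden_word; infer_instance

-- ===== CLAIM (what is proved, stated in full; the proofs are below) =====
def Claim_equal_make_hidden_word : Prop := ∀ (word : String), Dom_make_hidden_word word → Spec_make_hidden_word word (make_hidden_word word)

-- ===== LEMMAS AND PROOFS =====

/-- Functional description of splitting a char list on single spaces. -/
def pvSegs : List Char → List (List Char)
  | [] => [[]]
  | c :: rest =>
      if c = ' ' then [] :: pvSegs rest
      else (c :: (pvSegs rest).headI) :: (pvSegs rest).tail

theorem pvSegs_ne_nil (cs : List Char) : pvSegs cs ≠ [] := by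
  cases cs with
  | nil => simp [pvSegs]
  | cons c rest => by_cases h : c = ' ' <;> simp [pvSegs, h]

theorem pvSegs_head_tail (cs : List Char) :
    (pvSegs cs).headI :: (pvSegs cs).tail = pvSegs cs := by
  cases h : pvSegs cs with
  | nil => exact absurd h (pvSegs_ne_nil cs)
  | cons a t => simp

theorem go_segs : ∀ (fuel : Nat) (l cur : List Char) (acc : List (List Char)),
    l.length < fuel →
    PySem.Chars.splitOn.go [' '] fuel l cur acc =
      acc.reverse ++ ((cur.reverse ++ (pvSegs l).headI) :: (pvSegs l).tail) := by
  intro fuel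
  induction fuel with
  | zero => intro l cur acc h; omega
  | succ n ih =>
    intro l cur acc h
    cases l with
    | nil =>
      simp [PySem.Chars.splitOn.go, pvSegs]
    | cons c rest =>
      by_cases hc : c = ' '
      · subst hc
        have hpre : List.isPrefixOf [' '] (' ' :: rest) = true := by
          simp [List.isPrefixOf]
        rw [PySem.Chars.splitOn.go, if_pos hpre]
        simp only [List.length_cons, List.length_nil, List.drop_succ_cons, List.drop_zero]
        rw [ih rest [] (cur.reverse :: acc) (by simp at h; omega)]
        simp [pvSegs, pvSegs_head_tail]
      · have hpre : List.isPrefixOf [' '] (c :: rest) = false := by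
          simp [List.isPrefixOf]
          exact fun h' => (hc h'.symm).elim
        rw [PySem.Chars.splitOn.go, if_neg (by simp [hpre])]
        rw [ih rest (c :: cur) acc (by simp at h; omega)]
        simp [pvSegs, hc]

theorem splitOn_eq_segs (cs : List Char) :
    PySem.Chars.splitOn cs [' '] = pvSegs cs := by
  unfold PySem.Chars.splitOn
  rw [go_segs (cs.length + 1) cs [] [] (Nat.lt_succ_self _)]
  simpa using pvSegs_head_tail cs

theorem intercalate_cons {α : Type} (sep a : List α) (l : List (List α)) (h : l ≠ []) :
    List.intercalate sep (a :: l) = a ++ sep ++ List.intercalate sep l := by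
  cases l with
  | nil => exact absurd rfl h
  | cons b t => simp [List.intercalate, List.intersperse, List.flatten, List.append_assoc]

/-- Masking the segments and rejoining = masking character-wise. -/
theorem join_mask (cs : List Char) :
    PySem.Chars.join [' ']
        ((pvSegs cs).map (fun run => List.replicate run.length '*')) =
      cs.map (fun c => if c = ' ' then ' ' else '*') := by
  induction cs with
  | nil => simp [pvSegs, PySem.Chars.join, List.intercalate]
  | cons c rest ih =>
    unfold PySem.Chars.join at *
    by_cases hc : c = ' '
    · subst hc
      rw [pvSegs, if_pos rfl, List.map_cons,
          intercalate_cons _ _ _ (by simp [pvSegs_ne_nil]), ih]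
      simp
    · rw [pvSegs, if_neg hc, List.map_cons]
      cases hseg : pvSegs rest with
      | nil => exact absurd hseg (pvSegs_ne_nil rest)
      | cons hd t =>
        rw [hseg] at ih
        simp only [List.headI, List.tail]
        cases t with
        | nil =>
          simp only [List.intercalate, List.intersperse, List.map_cons, List.map_nil,
            List.flatten] at ih ⊢
          simp_all [List.replicate_succ]
        | cons b t' =>
          rw [List.map_cons] at ih
          rw [intercalate_cons _ _ _ (by simp)] at ih
          rw [List.map_cons, intercalate_cons _ _ _ (by simp)]
          simp_all [List.replicate_succ]

theorem foldl_mask (cs : List Char) (acc : List String) :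
    cs.foldl (fun hidden i => if i ≠ ' ' then hidden ++ ["*"] else hidden ++ [" "]) acc =
      acc ++ cs.map (fun c => if c = ' ' then " " else "*") := by
  induction cs generalizing acc with
  | nil => simp
  | cons c rest ih =>
    rw [List.foldl_cons, ih]
    by_cases hc : c = ' ' <;> simp [hc]

-- ===== VERDICT (by name: the statement is the Claim_ definition above) =====
theorem make_hidden_word_spec : Claim_equal_make_hidden_word := by
  intro word _
  unfold Spec_make_hidden_word make_hidden_word make_hidden_word_alt
  rw [splitOn_eq_segs, join_mask, foldl_mask]
  simp only [List.nil_append, List.map_map]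
  apply List.map_congr_left
  intro c _
  by_cases hc : c = ' ' <;> simp [hc] <;> rfl
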